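-- pv_equiv track=rewrite | github.com/cwethm/windsurf-project-fantasy-rpg-backup | phase4_acceptance_test.py | spiral_scan_chunks
-- ===== SOURCE A (Python) =====
-- def spiral_scan_chunks(center_x, center_z, radius):
--     """Generate chunk coordinates in a spiral pattern from center."""
--     x, z = 0, 0
--     dx, dz = 0, -1
--
--     for step in range(radius * radius):
--         yield (center_x + x, center_z + z)
--
--         if x == z or (x < 0 and x == -z) or (x > 0 and x == 1 - z):
--             dx, dz = -dz, dx
--
--         x += dx
--         z += dz
-- ===== SOURCE B (Python) =====
-- def spiral_scan_chunks(center_x, center_z, radius):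
--     """Generate chunk coordinates in a spiral pattern from center (ring by ring)."""
--     n = radius * radius
--     if n <= 0:
--         return
--     yield (center_x, center_z)
--     n -= 1
--     r = 1
--     while n > 0:
--         ring = (
--             [(r, z) for z in range(1 - r, r + 1)]
--             + [(x, r) for x in range(r - 1, -r - 1, -1)]
--             + [(-r, z) for z in range(r - 1, -r - 1, -1)]
--             + [(x, -r) for x in range(1 - r, r + 1)]
--         )
--         for dx, dz in ring:
--             yield (center_x + dx, center_z + dz)
--             n -= 1
--             if n == 0:
--                 return
--         r += 1
-- ===== Notes on version B (the rewrite author's own statement) =====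
-- stated objective: alternative
-- what changed: Replaces A's per-cell turning-direction state machine with ring-by-ring generation: each ring's four sides are emitted as explicit range comprehensions and the walk stops mid-ring once radius*radius cells were yielded.
import Mathlib
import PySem

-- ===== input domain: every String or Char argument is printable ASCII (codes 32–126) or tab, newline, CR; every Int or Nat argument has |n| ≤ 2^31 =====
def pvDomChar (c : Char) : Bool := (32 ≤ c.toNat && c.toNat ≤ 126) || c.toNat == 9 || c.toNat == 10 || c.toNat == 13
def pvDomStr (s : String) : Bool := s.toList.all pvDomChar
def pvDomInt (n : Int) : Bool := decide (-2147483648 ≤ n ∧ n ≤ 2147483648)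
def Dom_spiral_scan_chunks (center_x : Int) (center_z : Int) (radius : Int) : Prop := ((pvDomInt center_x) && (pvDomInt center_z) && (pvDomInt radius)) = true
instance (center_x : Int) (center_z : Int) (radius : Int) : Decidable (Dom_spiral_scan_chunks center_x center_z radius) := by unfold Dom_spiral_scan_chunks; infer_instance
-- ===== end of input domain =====

-- B produces the same spiral ring by ring with explicit side ranges instead of A's turning-direction state machine; same cost, different decomposition (objective: alternative).
-- Both programs are Python generators; they are ported as the list of all yielded values.

-- ===== PORT A =====
-- Python A's turn test `x == z or (x < 0 and x == -z) or (x > 0 and x == 1 - z)`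
def spiralTurn (x z : Int) : Bool :=
  (x == z) || (decide (x < 0) && (x == -z)) || (decide (x > 0) && (x == 1 - z))

-- one iteration of A's loop body on the state (x, z, dx, dz, acc)
def spiralStep (cx cz : Int) (st : Int × Int × Int × Int × List (Int × Int)) :
    Int × Int × Int × Int × List (Int × Int) :=
  let x := st.1; let z := st.2.1; let dx := st.2.2.1; let dz := st.2.2.2.1
  let acc := st.2.2.2.2 ++ [(cx + x, cz + z)]
  let d := if spiralTurn x z then (-dz, dx) else (dx, dz)
  (x + d.1, z + d.2, d.1, d.2, acc)

def spiral_scan_chunks (center_x : Int) (center_z : Int) (radius : Int) : List (Int × Int) :=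
  ((PySem.List.pyRange 0 (radius * radius) 1).foldl
    (fun st _ => spiralStep center_x center_z st)
    (0, 0, 0, -1, [])).2.2.2.2

-- ===== PORT B =====
-- the four Python list comprehensions over range(...) building one ring
def ringCells (r : Int) : List (Int × Int) :=
  (PySem.List.pyRange (1 - r) (r + 1) 1).map (fun z => (r, z))
  ++ (PySem.List.pyRange (r - 1) (-r - 1) (-1)).map (fun x => (x, r))
  ++ (PySem.List.pyRange (r - 1) (-r - 1) (-1)).map (fun z => (-r, z))
  ++ (PySem.List.pyRange (1 - r) (r + 1) 1).map (fun x => (x, -r))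

-- B's `while n > 0` loop; fuel only makes the recursion total (each ring emits ≥ 1 cell)
def emitRings (cx cz : Int) : Nat → Nat → Int → List (Int × Int)
  | 0, _, _ => []
  | fuel + 1, n, r =>
    if n = 0 then []
    else
      let cells := (ringCells r).map (fun p => (cx + p.1, cz + p.2))
      if cells.length < n then cells ++ emitRings cx cz fuel (n - cells.length) (r + 1)
      else cells.take n

def spiral_scan_chunks_alt (center_x : Int) (center_z : Int) (radius : Int) : List (Int × Int) :=
  let n := (radius * radius).toNat
  if n = 0 then []
  else (center_x, center_z) :: emitRings center_x center_z (n - 1) (n - 1) 1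

-- ===== PRECONDITION & SPEC =====
def Spec_spiral_scan_chunks (center_x : Int) (center_z : Int) (radius : Int) (out : List (Int × Int)) : Prop := out = spiral_scan_chunks_alt center_x center_z radius
instance (center_x : Int) (center_z : Int) (radius : Int) (out : List (Int × Int)) : Decidable (Spec_spiral_scan_chunks center_x center_z radius out) := by unfold Spec_spiral_scan_chunks; infer_instance

-- ===== CLAIM (what is proved, stated in full; the proofs are below) =====
def Claim_equal_spiral_scan_chunks : Prop := ∀ (center_x : Int) (center_z : Int) (radius : Int), Dom_spiral_scan_chunks center_x center_z radius → Spec_spiral_scan_chunks center_x center_z radius (spiral_scan_chunks center_x center_z radius)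

-- ===== LEMMAS AND PROOFS =====

-- A's turn condition as a proposition
def turnP (x z : Int) : Prop := x = z ∨ (x < 0 ∧ x = -z) ∨ (x > 0 ∧ x = 1 - z)

theorem spiralTurn_iff (x z : Int) : spiralTurn x z = true ↔ turnP x z := by
  simp [spiralTurn, turnP]
  tauto

-- A's state transition without the accumulator
def nextSt (x z dx dz : Int) : Int × Int × Int × Int :=
  let d := if spiralTurn x z then (-dz, dx) else (dx, dz)
  (x + d.1, z + d.2, d.1, d.2)

theorem nextSt_turn (x z dx dz : Int) (h : turnP x z) :
    nextSt x z dx dz = (x - dz, z + dx, -dz, dx) := by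
  simp [nextSt, (spiralTurn_iff x z).mpr h]
  ring

theorem nextSt_straight (x z dx dz : Int) (h : ¬ turnP x z) :
    nextSt x z dx dz = (x + dx, z + dz, dx, dz) := by
  have : spiralTurn x z = false := by
    cases hb : spiralTurn x z
    · rfl
    · exact absurd ((spiralTurn_iff x z).mp hb) h
  simp [nextSt, this]

-- all values yielded by A in m further steps
def runA (cx cz : Int) : Nat → Int × Int × Int × Int → List (Int × Int)
  | 0, _ => []
  | k + 1, s => (cx + s.1, cz + s.2.1) :: runA cx cz k (nextSt s.1 s.2.1 s.2.2.1 s.2.2.2)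

theorem foldA (cx cz : Int) (l : List Int) : ∀ (x z dx dz : Int) (acc : List (Int × Int)),
    (l.foldl (fun st _ => spiralStep cx cz st) (x, z, dx, dz, acc)).2.2.2.2
      = acc ++ runA cx cz l.length (x, z, dx, dz) := by
  induction l with
  | nil => intro x z dx dz acc; simp [runA]
  | cons a l ih =>
    intro x z dx dz acc
    have hstep : spiralStep cx cz (x, z, dx, dz, acc)
        = ((nextSt x z dx dz).1, (nextSt x z dx dz).2.1, (nextSt x z dx dz).2.2.1,
           (nextSt x z dx dz).2.2.2, acc ++ [(cx + x, cz + z)]) := by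
      simp [spiralStep, nextSt]
    simp only [List.foldl_cons, hstep, List.length_cons, runA, ih]
    simp [runA]

-- "from state s, A yields exactly L and then continues from s'"
def Emits (cx cz : Int) (s : Int × Int × Int × Int) (L : List (Int × Int))
    (s' : Int × Int × Int × Int) : Prop :=
  ∀ m : Nat, runA cx cz m s = L.take m ++ runA cx cz (m - L.length) s'

theorem emits_one (cx cz x z dx dz : Int) :
    Emits cx cz (x, z, dx, dz) [(cx + x, cz + z)] (nextSt x z dx dz) := by
  intro m
  cases m with
  | zero => simp [runA]
  | succ k => simp [runA]

theorem emits_chain {cx cz : Int} {s1 s2 s3 : Int × Int × Int × Int}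
    {L1 L2 : List (Int × Int)} (h1 : Emits cx cz s1 L1 s2) (h2 : Emits cx cz s2 L2 s3) :
    Emits cx cz s1 (L1 ++ L2) s3 := by
  intro m
  rw [h1 m, h2 (m - L1.length)]
  rw [List.take_append, List.append_assoc]
  have : m - L1.length - L2.length = m - (L1 ++ L2).length := by
    simp; omega
  rw [this]

-- a straight run of k no-turn cells
def segL (cx cz dx dz : Int) : Nat → Int → Int → List (Int × Int)
  | 0, _, _ => []
  | k + 1, x, z => (cx + x, cz + z) :: segL cx cz dx dz k (x + dx) (z + dz)

theorem emits_seg (cx cz : Int) (dx dz : Int) : ∀ (k : Nat) (x z : Int),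
    (∀ i : Nat, i < k → ¬ turnP (x + i * dx) (z + i * dz)) →
    Emits cx cz (x, z, dx, dz) (segL cx cz dx dz k x z) (x + k * dx, z + k * dz, dx, dz) := by
  intro k
  induction k with
  | zero =>
    intro x z _ m
    simp [segL, runA]
  | succ k ih =>
    intro x z h
    have h0 : ¬ turnP x z := by
      have := h 0 (by omega); simpa using this
    have hone := emits_one cx cz x z dx dz
    rw [nextSt_straight x z dx dz h0] at hone
    have hrest := ih (x + dx) (z + dz) (by
      intro i hi
      have := h (i + 1) (by omega)
      have e1 : x + dx + (i : Int) * dx = x + ((i : Nat) + 1 : Int) * dx := by ring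
      have e2 : z + dz + (i : Int) * dz = z + ((i : Nat) + 1 : Int) * dz := by ring
      rw [e1, e2]
      convert this using 3 <;> push_cast <;> ring)
    have := emits_chain hone hrest
    have hL : [(cx + x, cz + z)] ++ segL cx cz dx dz k (x + dx) (z + dz)
        = segL cx cz dx dz (k + 1) x z := by simp [segL]
    rw [hL] at this
    have e1 : x + dx + (k : Int) * dx = x + ((k : Nat) + 1 : Int) * dx := by ring
    have e2 : z + dz + (k : Int) * dz = z + ((k : Nat) + 1 : Int) * dz := by ring
    rw [e1, e2] at this
    convert this using 3 <;> push_cast <;> ring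

theorem segL_eq_map (cx cz dx dz : Int) : ∀ (k : Nat) (x z : Int),
    segL cx cz dx dz k x z = (List.range k).map (fun i : Nat => (cx + x + (i : Int) * dx, cz + z + (i : Int) * dz)) := by
  intro k
  induction k with
  | zero => intro x z; simp [segL]
  | succ k ih =>
    intro x z
    rw [List.range_succ_eq_map, List.map_cons, List.map_map]
    simp only [segL, ih]
    congr 1
    · simp
    · refine List.map_congr_left (fun i _ => ?_)
      simp only [Function.comp_apply, Prod.mk.injEq]
      constructor <;> push_cast <;> ring

-- state/list congruence for Emits
theorem emits_congr {cx cz : Int} {s s' t t' : Int × Int × Int × Int} {L L' : List (Int × Int)}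
    (h : Emits cx cz s L t) (hs : s = s') (ht : t = t') (hL : L = L') :
    Emits cx cz s' L' t' := by
  subst hs; subst ht; subst hL; exact h

-- ring r written as A emits it: four corner cells interleaved with straight runs
theorem ring_eq (cx cz r : Int) (hr : 1 ≤ r) :
    (ringCells r).map (fun p => (cx + p.1, cz + p.2)) =
      [(cx + r, cz + (1 - r))] ++ segL cx cz 0 1 (2 * r - 2).toNat r (2 - r)
      ++ ([(cx + r, cz + r)] ++ (segL cx cz (-1) 0 (2 * r - 1).toNat (r - 1) r
      ++ ([(cx + (-r), cz + r)] ++ (segL cx cz 0 (-1) (2 * r - 1).toNat (-r) (r - 1)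
      ++ ([(cx + (-r), cz + (-r))] ++ segL cx cz 1 0 (2 * r).toNat (1 - r) (-r)))))) := by
  have hB1 : (PySem.List.pyRange (1 - r) (r + 1) 1).map (fun z => (cx + r, cz + z)) =
      [(cx + r, cz + (1 - r))] ++ segL cx cz 0 1 (2 * r - 2).toNat r (2 - r)
        ++ [(cx + r, cz + r)] := by
    rw [PySem.List.pyRange_one, segL_eq_map, List.map_map]
    have hn : (r + 1 - (1 - r)).toNat = ((2 * r - 2).toNat + 1) + 1 := by omega
    rw [hn, List.range_succ, List.range_succ_eq_map, List.map_append, List.map_cons, List.map_map]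
    simp only [List.cons_append, List.nil_append, List.append_assoc, List.singleton_append]
    refine congrArg₂ _ (by simp) (congrArg₂ _ ?_ ?_)
    · refine List.map_congr_left (fun i _ => ?_)
      simp only [Function.comp_apply, Prod.mk.injEq]
      constructor <;> push_cast <;> ring
    · simp only [List.map_cons, List.map_nil, List.cons.injEq, Function.comp_apply,
        Prod.mk.injEq, true_and, and_true]
      push_cast; try omega
  have hB2 : (PySem.List.pyRange (r - 1) (-r - 1) (-1)).map (fun x => (cx + x, cz + r)) =
      segL cx cz (-1) 0 (2 * r - 1).toNat (r - 1) r ++ [(cx + (-r), cz + r)] := by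
    rw [PySem.List.pyRange_neg_one, segL_eq_map, List.map_map]
    have hn : (r - 1 - (-r - 1)).toNat = (2 * r - 1).toNat + 1 := by omega
    rw [hn, List.range_succ, List.map_append]
    refine congrArg₂ _ ?_ ?_
    · refine List.map_congr_left (fun i _ => ?_)
      simp only [Function.comp_apply, Prod.mk.injEq]
      constructor <;> push_cast <;> ring
    · simp only [List.map_cons, List.map_nil, List.cons.injEq, Function.comp_apply,
        Prod.mk.injEq, true_and, and_true]
      push_cast; try omega
  have hB3 : (PySem.List.pyRange (r - 1) (-r - 1) (-1)).map (fun z => (cx + -r, cz + z)) =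
      segL cx cz 0 (-1) (2 * r - 1).toNat (-r) (r - 1) ++ [(cx + (-r), cz + (-r))] := by
    rw [PySem.List.pyRange_neg_one, segL_eq_map, List.map_map]
    have hn : (r - 1 - (-r - 1)).toNat = (2 * r - 1).toNat + 1 := by omega
    rw [hn, List.range_succ, List.map_append]
    refine congrArg₂ _ ?_ ?_
    · refine List.map_congr_left (fun i _ => ?_)
      simp only [Function.comp_apply, Prod.mk.injEq]
      constructor <;> push_cast <;> ring
    · simp only [List.map_cons, List.map_nil, List.cons.injEq, Function.comp_apply,
        Prod.mk.injEq, true_and, and_true]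
      push_cast; try omega
  have hB4 : (PySem.List.pyRange (1 - r) (r + 1) 1).map (fun x => (cx + x, cz + -r)) =
      segL cx cz 1 0 (2 * r).toNat (1 - r) (-r) := by
    rw [PySem.List.pyRange_one, segL_eq_map, List.map_map]
    have hn : (r + 1 - (1 - r)).toNat = (2 * r).toNat := by omega
    rw [hn]
    refine List.map_congr_left (fun i _ => ?_)
    simp only [Function.comp_apply, Prod.mk.injEq]
    constructor <;> push_cast <;> ring
  simp only [ringCells, List.map_append, List.map_map]
  simp only [Function.comp_def]
  rw [hB1, hB2, hB3, hB4]
  simp [List.append_assoc]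

theorem turnP_dec (x z : Int) (h : x = z ∨ (x < 0 ∧ x = -z) ∨ (0 < x ∧ x = 1 - z)) : turnP x z := by
  unfold turnP; omega

theorem not_turnP (x z : Int) (h : ¬ (x = z ∨ (x < 0 ∧ x = -z) ∨ (0 < x ∧ x = 1 - z))) : ¬ turnP x z := by
  unfold turnP; omega

-- the whole ring r, as emitted by A
theorem emits_ring (cx cz r : Int) (hr : 1 ≤ r) :
    Emits cx cz (r, 1 - r, 1, 0)
      ((ringCells r).map (fun p => (cx + p.1, cz + p.2)))
      (r + 1, -r, 1, 0) := by
  have E1 : Emits cx cz (r, 1 - r, 1, 0) [(cx + r, cz + (1 - r))] (r, 2 - r, 0, 1) := by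
    refine emits_congr (emits_one cx cz r (1 - r) 1 0) rfl ?_ rfl
    rw [nextSt_turn r (1 - r) 1 0 (turnP_dec _ _ (by omega))]
    simp only [Prod.mk.injEq, neg_zero, true_and, and_true]
    try omega
  have E2 : Emits cx cz (r, 2 - r, 0, 1) (segL cx cz 0 1 (2 * r - 2).toNat r (2 - r))
      (r, r, 0, 1) := by
    refine emits_congr (emits_seg cx cz 0 1 (2 * r - 2).toNat r (2 - r) ?_) rfl ?_ rfl
    · intro i hi
      refine not_turnP _ _ ?_
      push_cast at hi ⊢; omega
    · simp only [Prod.mk.injEq, mul_zero, mul_one, mul_neg_one, neg_zero, true_and, and_true]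
      try omega
  have E3 : Emits cx cz (r, r, 0, 1) [(cx + r, cz + r)] (r - 1, r, -1, 0) := by
    refine emits_congr (emits_one cx cz r r 0 1) rfl ?_ rfl
    rw [nextSt_turn r r 0 1 (turnP_dec _ _ (by omega))]
    simp only [Prod.mk.injEq, neg_zero, true_and, and_true]
    try omega
  have E4 : Emits cx cz (r - 1, r, -1, 0) (segL cx cz (-1) 0 (2 * r - 1).toNat (r - 1) r)
      (-r, r, -1, 0) := by
    refine emits_congr (emits_seg cx cz (-1) 0 (2 * r - 1).toNat (r - 1) r ?_) rfl ?_ rfl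
    · intro i hi
      refine not_turnP _ _ ?_
      push_cast at hi ⊢; omega
    · simp only [Prod.mk.injEq, mul_zero, mul_one, mul_neg_one, neg_zero, true_and, and_true]
      try omega
  have E5 : Emits cx cz (-r, r, -1, 0) [(cx + (-r), cz + r)] (-r, r - 1, 0, -1) := by
    refine emits_congr (emits_one cx cz (-r) r (-1) 0) rfl ?_ rfl
    rw [nextSt_turn (-r) r (-1) 0 (turnP_dec _ _ (by omega))]
    simp only [Prod.mk.injEq, neg_zero, true_and, and_true]
    try omega
  have E6 : Emits cx cz (-r, r - 1, 0, -1) (segL cx cz 0 (-1) (2 * r - 1).toNat (-r) (r - 1))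
      (-r, -r, 0, -1) := by
    refine emits_congr (emits_seg cx cz 0 (-1) (2 * r - 1).toNat (-r) (r - 1) ?_) rfl ?_ rfl
    · intro i hi
      refine not_turnP _ _ ?_
      push_cast at hi ⊢; omega
    · simp only [Prod.mk.injEq, mul_zero, mul_one, mul_neg_one, neg_zero, true_and, and_true]
      try omega
  have E7 : Emits cx cz (-r, -r, 0, -1) [(cx + (-r), cz + (-r))] (1 - r, -r, 1, 0) := by
    refine emits_congr (emits_one cx cz (-r) (-r) 0 (-1)) rfl ?_ rfl
    rw [nextSt_turn (-r) (-r) 0 (-1) (turnP_dec _ _ (by omega))]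
    simp only [Prod.mk.injEq, neg_zero, true_and, and_true]
    try omega
  have E8 : Emits cx cz (1 - r, -r, 1, 0) (segL cx cz 1 0 (2 * r).toNat (1 - r) (-r))
      (r + 1, -r, 1, 0) := by
    refine emits_congr (emits_seg cx cz 1 0 (2 * r).toNat (1 - r) (-r) ?_) rfl ?_ rfl
    · intro i hi
      refine not_turnP _ _ ?_
      push_cast at hi ⊢; omega
    · simp only [Prod.mk.injEq, mul_zero, mul_one, mul_neg_one, neg_zero, true_and, and_true]
      try omega
  refine emits_congr
    (emits_chain E1 (emits_chain E2 (emits_chain E3 (emits_chain E4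
      (emits_chain E5 (emits_chain E6 (emits_chain E7 E8))))))) rfl rfl ?_
  rw [ring_eq cx cz r hr]
  simp [List.append_assoc]

theorem ring_length (cx cz r : Int) (hr : 1 ≤ r) :
    ((ringCells r).map (fun p : Int × Int => (cx + p.1, cz + p.2))).length = (8 * r).toNat := by
  simp only [ringCells, List.length_map, List.length_append,
    PySem.List.length_pyRange_one, PySem.List.length_pyRange_neg_one]
  omega

theorem emit_eq (cx cz : Int) : ∀ (fuel n : Nat) (r : Int), 1 ≤ r → n ≤ fuel →
    emitRings cx cz fuel n r = runA cx cz n (r, 1 - r, 1, 0) := by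
  intro fuel
  induction fuel with
  | zero =>
    intro n r hr hn
    have : n = 0 := by omega
    subst this
    simp [emitRings, runA]
  | succ fuel ih =>
    intro n r hr hn
    by_cases h0 : n = 0
    · subst h0; simp [emitRings, runA]
    · have hE := emits_ring cx cz r hr n
      have hlen := ring_length cx cz r hr
      simp only [emitRings, if_neg h0]
      by_cases hlt : ((ringCells r).map (fun p => (cx + p.1, cz + p.2))).length < n
      · rw [if_pos hlt, hE,
          List.take_of_length_le (by omega),
          ih (n - ((ringCells r).map (fun p => (cx + p.1, cz + p.2))).length) (r + 1)
            (by omega) (by omega)]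
        have : r + 1 - 1 = r := by ring
        rw [show (1 : Int) - (r + 1) = -r by ring]
      · rw [if_neg hlt, hE]
        have : n - ((ringCells r).map (fun p => (cx + p.1, cz + p.2))).length = 0 := by omega
        rw [this]
        simp [runA]

-- ===== VERDICT (by name: the statement is the Claim_ definition above) =====
theorem runA_eq_alt (cx cz : Int) (n : Nat) :
    runA cx cz n (0, 0, 0, -1)
      = (if n = 0 then [] else (cx, cz) :: emitRings cx cz (n - 1) (n - 1) 1) := by
  cases n with
  | zero => simp [runA]
  | succ m =>
    rw [if_neg (Nat.succ_ne_zero m)]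
    have h1 : nextSt 0 0 0 (-1) = (1, 1 - 1, 1, 0) := by
      rw [nextSt_turn 0 0 0 (-1) (turnP_dec _ _ (by omega))]
      norm_num
    simp only [runA, h1, emit_eq cx cz m m 1 (by omega) (le_refl m), Nat.add_sub_cancel]
    norm_num

theorem spiral_scan_chunks_spec : Claim_equal_spiral_scan_chunks := by
  intro cx cz radius _
  unfold Spec_spiral_scan_chunks spiral_scan_chunks spiral_scan_chunks_alt
  rw [foldA cx cz _ 0 0 0 (-1) [], List.nil_append]
  have hlen : (PySem.List.pyRange 0 (radius * radius) 1).length = (radius * radius).toNat := by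
    rw [PySem.List.length_pyRange_one]; norm_num
  rw [hlen, runA_eq_alt]
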